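-- pv_equiv track=rewrite | github.com/nowybackup/bard_ai-api_read_tabele | example.py | find_table_indices
-- ===== SOURCE A (Python) =====
-- def find_table_indices(lines):
--     """Znajduje indeksy początku i końca tabeli w tekście.
--
--     Parametry:
--     - lines (List[str]): Lista linii tekstu.
--
--     Zwraca:
--     - Tuple[Optional[int], Optional[int]]: Indeks początku i końca tabeli lub None, jeśli tabela nie została znaleziona.
--     """
--     table_start = None
--     table_end = None
--
--     for i, line in enumerate(lines):
--         if "|" in line:
--             table_start = i
--             break
--
--     for i in range(len(lines) - 1, -1, -1):
--         if "|" in lines[i]: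
--             table_end = i
--             break
--
--     return table_start, table_end
-- ===== SOURCE B (Python) =====
-- def find_table_indices(lines):
--     """Single forward pass: track first and last line containing '|'."""
--     table_start = None
--     table_end = None
--     for i, line in enumerate(lines):
--         if "|" in line:
--             if table_start is None:
--                 table_start = i
--             table_end = i
--     return table_start, table_end
-- ===== Notes on version B (the rewrite author's own statement) =====
-- stated objective: simpler
-- what changed: A's two scans (a forward break-on-first scan plus a separate reverse range(len-1,-1,-1) scan) are replaced by one forward pass over enumerate(lines) that maintains both endpoints.
import Mathlib
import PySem

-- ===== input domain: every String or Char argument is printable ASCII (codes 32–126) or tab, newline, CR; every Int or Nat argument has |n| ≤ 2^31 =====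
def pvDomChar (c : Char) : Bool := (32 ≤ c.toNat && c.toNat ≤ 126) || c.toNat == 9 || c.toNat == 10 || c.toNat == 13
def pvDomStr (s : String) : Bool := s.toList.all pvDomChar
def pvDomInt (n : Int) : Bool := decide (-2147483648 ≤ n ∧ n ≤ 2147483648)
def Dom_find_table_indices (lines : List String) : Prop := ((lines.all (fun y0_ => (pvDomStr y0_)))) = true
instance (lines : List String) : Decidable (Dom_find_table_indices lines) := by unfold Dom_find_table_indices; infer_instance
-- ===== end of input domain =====

-- B replaces A's forward break-scan plus reverse range scan by a single forward fold maintaining both endpoints (objective: simpler).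

-- ===== PORT A =====
-- first loop: for i, line in enumerate(lines): if "|" in line: table_start = i; break
def aLoop1 : List (Int × String) → Option Int
  | [] => none
  | (i, l) :: rest => if PySem.Str.isIn "|" l then some i else aLoop1 rest

-- second loop: for i in range(len(lines)-1, -1, -1): if "|" in lines[i]: table_end = i; break
-- lines[i] is ported as pyGetD with default "" — exact, since every i in the range is a valid index
def aLoop2 (lines : List String) : List Int → Option Int
  | [] => none
  | i :: rest =>
      if PySem.Str.isIn "|" (PySem.List.pyGetD lines i "") then some i else aLoop2 lines rest

def find_table_indices (lines : List String) : Option Int × Option Int :=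
  let table_start := aLoop1 (PySem.List.enumerate lines 0)
  let table_end := aLoop2 lines (PySem.List.pyRange (PySem.List.len lines - 1) (-1) (-1))
  (table_start, table_end)

-- ===== PORT B =====
def find_table_indices_alt (lines : List String) : Option Int × Option Int :=
  (PySem.List.enumerate lines 0).foldl
    (fun st p =>
      if PySem.Str.isIn "|" p.2 then
        ((match st.1 with | none => some p.1 | some x => some x), some p.1)
      else st)
    (none, none)

-- ===== PRECONDITION & SPEC =====
def Spec_find_table_indices (lines : List String) (out : Option Int × Option Int) : Prop := out = find_table_indices_alt lines
instance (lines : List String) (out : Option Int × Option Int) : Decidable (Spec_find_table_indices lines out) := by unfold Spec_find_table_indices; infer_instance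

-- ===== CLAIM (what is proved, stated in full; the proofs are below) =====
def Claim_equal_find_table_indices : Prop := ∀ (lines : List String), Dom_find_table_indices lines → Spec_find_table_indices lines (find_table_indices lines)

-- ===== LEMMAS AND PROOFS =====

-- last index (from an enumerated list) whose line contains '|'
def bLast : List (Int × String) → Option Int
  | [] => none
  | (i, l) :: rest =>
      match bLast rest with
      | some j => some j
      | none => if PySem.Str.isIn "|" l then some i else none

theorem bLast_append (u v : List (Int × String)) :
    bLast (u ++ v) = match bLast v with | some j => some j | none => bLast u := by
  induction u with
  | nil => cases hb : bLast v <;> simp [bLast, hb]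
  | cons p rest ih =>
      obtain ⟨i, l⟩ := p
      simp only [List.cons_append, bLast, ih]
      cases bLast v <;> cases bLast rest <;> simp

theorem foldB_char (lines : List String) (s : Int) (st1 st2 : Option Int) :
    (PySem.List.enumerate lines s).foldl
      (fun st p =>
        if PySem.Str.isIn "|" p.2 then
          ((match st.1 with | none => some p.1 | some x => some x), some p.1)
        else st)
      (st1, st2)
    = ((match st1 with | none => aLoop1 (PySem.List.enumerate lines s) | some x => some x),
       (match bLast (PySem.List.enumerate lines s) with | none => st2 | some j => some j)) := by
  induction lines generalizing s st1 st2 with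
  | nil => cases st1 <;> simp [PySem.List.enumerate_nil, aLoop1, bLast]
  | cons l rest ih =>
      rw [PySem.List.enumerate_cons]
      by_cases h : PySem.Str.isIn "|" l
      · simp only [List.foldl_cons, h, if_pos, ih]
        cases st1 <;> cases hb : bLast (PySem.List.enumerate rest (s + 1)) <;>
          simp_all [aLoop1, bLast]
      · simp only [List.foldl_cons, h]
        simp only [Bool.false_eq_true, if_false, ih, aLoop1, bLast, h]
        cases hb : bLast (PySem.List.enumerate rest (s + 1)) <;> simp

-- aLoop2 only reads indices in its list, so appending a line past them changes nothing
theorem aLoop2_append (xs : List String) (x : String) (l : List Int)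
    (h : ∀ i ∈ l, 0 ≤ i ∧ i < (xs.length : Int)) :
    aLoop2 (xs ++ [x]) l = aLoop2 xs l := by
  induction l with
  | nil => rfl
  | cons i rest ih =>
      obtain ⟨⟨h0, hlt⟩, hrest⟩ := List.forall_mem_cons.mp h
      have hget : PySem.List.pyGetD (xs ++ [x]) i "" = PySem.List.pyGetD xs i "" := by
        rw [PySem.List.pyGetD_eq_getElem _ _ h0 (by simp; omega),
            PySem.List.pyGetD_eq_getElem _ _ h0 hlt]
        exact List.getElem_append_left _
      simp only [aLoop2, hget, ih hrest]

-- A's reverse scan computes the last pipe index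
theorem aLoop2_eq_bLast (lines : List String) :
    aLoop2 lines (PySem.List.pyRange ((lines.length : Int) - 1) (-1) (-1))
      = bLast (PySem.List.enumerate lines 0) := by
  induction lines using List.reverseRecOn with
  | nil => simp [PySem.List.pyRange_neg_one_eq_nil, PySem.List.enumerate_nil, bLast, aLoop2]
  | append_singleton xs x ih =>
      have hn : ((xs ++ [x]).length : Int) - 1 = (xs.length : Int) := by
        simp
      rw [hn, PySem.List.pyRange_neg_one_cons (by omega), PySem.List.enumerate_append,
          bLast_append]
      have hrange : ∀ i ∈ PySem.List.pyRange ((xs.length : Int) - 1) (-1) (-1),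
          0 ≤ i ∧ i < (xs.length : Int) := by
        intro i hi
        have := (PySem.List.mem_pyRange_neg_one).mp hi
        omega
      have hget : PySem.List.pyGetD (xs ++ [x]) (xs.length : Int) "" = x := by
        rw [PySem.List.pyGetD_eq_getElem _ _ (by omega) (by simp)]
        simp
      simp only [aLoop2, hget, aLoop2_append xs x _ hrange, ih,
        PySem.List.enumerate, bLast]
      by_cases h : PySem.Str.isIn "|" x <;>
        cases hb : bLast (PySem.List.enumerate xs 0) <;> simp_all

-- ===== VERDICT (by name: the statement is the Claim_ definition above) =====
theorem find_table_indices_spec : Claim_equal_find_table_indices := by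
  intro lines _
  unfold Spec_find_table_indices find_table_indices find_table_indices_alt
  rw [foldB_char]
  simp only [PySem.List.len_eq]
  rw [aLoop2_eq_bLast]
  cases bLast (PySem.List.enumerate lines 0) <;> simp
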